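-- pv_equiv track=rewrite | github.com/tahh1/data-leakage-detection | data/Experiment1/nb_258.py | WordsVocabCountDF
-- ===== SOURCE A (Python) =====
-- def WordsVocabCountDF(data):
--
--     if isinstance(data, list):
--         rowList = data
--     else:
--         rowList = data.tolist()          #Convert the dataframe column to a list
--     words = []                      #Create an empty list
--     for i in range(len(rowList)):   #For each row of the dataframe
--         sents = rowList[i].split('.') #Get the entire sentence
--         for j in range(len(sents)):   #For each sentence
--             word = sents[j].split(' ') #Get all the words
--             words.extend(word)         #Add the words to the list
--
--     totWords = len(words) #Total number of Words
--     vocab = len(set(words)) #Returns vocabulary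
--
--     return totWords, vocab
-- ===== SOURCE B (Python) =====
-- def WordsVocabCountDF(data):
--     if isinstance(data, list):
--         rowList = data
--     else:
--         rowList = data.tolist()
--     total = 0
--     vocab = set()
--     for row in rowList:
--         cur = []
--         for ch in row:
--             if ch == ' ' or ch == '.':
--                 total += 1
--                 vocab.add(''.join(cur))
--                 cur = []
--             else:
--                 cur.append(ch)
--         total += 1
--         vocab.add(''.join(cur))
--     return total, len(vocab)
-- ===== Notes on version B (the rewrite author's own statement) =====
-- stated objective: alternative
-- what changed: Replaced A's nested split('.')/split(' ') loops that materialise the full word list with a single character-level scan per row that counts tokens and grows the vocabulary set incrementally, never building the word list.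
import Mathlib
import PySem

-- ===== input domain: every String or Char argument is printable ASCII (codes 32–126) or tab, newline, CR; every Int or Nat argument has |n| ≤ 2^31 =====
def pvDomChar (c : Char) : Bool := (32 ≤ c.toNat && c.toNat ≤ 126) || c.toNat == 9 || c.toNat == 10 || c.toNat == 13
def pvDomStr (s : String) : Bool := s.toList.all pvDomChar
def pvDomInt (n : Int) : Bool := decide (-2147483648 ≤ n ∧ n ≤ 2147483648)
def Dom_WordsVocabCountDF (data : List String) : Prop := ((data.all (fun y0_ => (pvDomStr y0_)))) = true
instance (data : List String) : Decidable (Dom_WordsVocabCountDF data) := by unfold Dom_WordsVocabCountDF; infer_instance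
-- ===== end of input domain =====

-- B replaces A's nested split('.')/split(' ') loops by a single character scan per row that
-- counts tokens and grows the vocabulary set incrementally, never building the word list (alternative).

-- ===== PORT A =====
-- s.split(sep) for a NONEMPTY literal sep: exact, PySem.Chars.splitOn is the sep ≠ "" form of str.split
def pySplitStr (s : String) (sep : String) : List String :=
  (PySem.Chars.splitOn s.toList sep.toList).map String.ofList

def WordsVocabCountDF (data : List String) : Int × Int :=
  let rowList := data
  let words : List String :=
    (PySem.List.pyRange 0 (PySem.List.len rowList) 1).foldl
      (fun words i =>
        let sents := pySplitStr (PySem.List.pyGetD rowList i "") "."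
        (PySem.List.pyRange 0 (PySem.List.len sents) 1).foldl
          (fun words j =>
            let word := pySplitStr (PySem.List.pyGetD sents j "") " "
            words ++ word)
          words)
      []
  (PySem.List.len words, PySem.Set.len (PySem.Set.ofList words))

-- ===== PORT B =====
-- the inner character loop of B: cur is the unfinished token, total the token count so far,
-- vocab the vocabulary set; the final 'total += 1; vocab.add(''.join(cur))' is the [] case
def altRow : List Char → List Char → Int → PySem.Set String → Int × PySem.Set String
  | [], cur, total, vocab => (total + 1, vocab.add (String.ofList cur))
  | c :: rest, cur, total, vocab =>
    if c = ' ' || c = '.' then altRow rest [] (total + 1) (vocab.add (String.ofList cur))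
    else altRow rest (cur ++ [c]) total vocab

def WordsVocabCountDF_alt (data : List String) : Int × Int :=
  let acc := data.foldl (fun acc row => altRow row.toList [] acc.1 acc.2)
    ((0 : Int), (PySem.Set.empty : PySem.Set String))
  (acc.1, PySem.Set.len acc.2)

-- ===== PRECONDITION & SPEC =====
def Spec_WordsVocabCountDF (data : List String) (out : Int × Int) : Prop := out = WordsVocabCountDF_alt data
instance (data : List String) (out : Int × Int) : Decidable (Spec_WordsVocabCountDF data out) := by unfold Spec_WordsVocabCountDF; infer_instance

-- ===== CLAIM (what is proved, stated in full; the proofs are below) =====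
def Claim_equal_WordsVocabCountDF : Prop := ∀ (data : List String), Dom_WordsVocabCountDF data → Spec_WordsVocabCountDF data (WordsVocabCountDF data)

-- ===== LEMMAS AND PROOFS =====

-- splitPR p cs = (first piece, remaining pieces) of cs split at characters with p
def splitPR (p : Char → Bool) : List Char → List Char × List (List Char)
  | [] => ([], [])
  | c :: r =>
    let (h, t) := splitPR p r
    if p c then ([], h :: t) else (c :: h, t)

def mySplit (p : Char → Bool) (cs : List Char) : List (List Char) :=
  (splitPR p cs).1 :: (splitPR p cs).2

lemma splitOn_go_single (d : Char) (fuel : Nat) (l cur : List Char) (acc : List (List Char))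
    (h : l.length < fuel) :
    PySem.Chars.splitOn.go [d] fuel l cur acc =
      acc.reverse ++ (cur.reverse ++ (splitPR (d == ·) l).1) :: (splitPR (d == ·) l).2 := by
  induction fuel generalizing l cur acc with
  | zero => omega
  | succ f ih =>
    cases l with
    | nil => simp [PySem.Chars.splitOn.go, splitPR]
    | cons c rest =>
      have hpre : [d].isPrefixOf (c :: rest) = (d == c) := by simp [List.isPrefixOf]
      by_cases hc : d = c
      · subst hc
        have hp : [d].isPrefixOf (d :: rest) = true := by simp [List.isPrefixOf]
        simp only [PySem.Chars.splitOn.go, hp, if_true, List.length_cons, List.length_nil,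
          List.drop_succ_cons, List.drop_zero]
        rw [ih rest [] (cur.reverse :: acc) (by simpa using Nat.lt_of_succ_lt_succ h)]
        simp [splitPR]
      · have hb : (d == c) = false := by simp [hc]
        simp only [PySem.Chars.splitOn.go, hpre, hb, Bool.false_eq_true, if_neg, not_false_iff]
        rw [ih rest (c :: cur) acc (by simpa using Nat.lt_of_succ_lt_succ h)]
        simp [splitPR, hb]

lemma splitOn_single (cs : List Char) (d : Char) :
    PySem.Chars.splitOn cs [d] = mySplit (d == ·) cs := by
  unfold PySem.Chars.splitOn mySplit
  rw [splitOn_go_single d (cs.length + 1) cs [] [] (by omega)]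
  simp

-- tokenising on '.' then on ' ' is tokenising on both at once
lemma split_compose (cs : List Char) :
    (mySplit ('.' == ·) cs).flatMap (fun sent => mySplit (' ' == ·) sent) =
      mySplit (fun c => c = ' ' || c = '.') cs := by
  induction cs with
  | nil => simp [mySplit, splitPR]
  | cons c r ih =>
    rcases hb : splitPR (fun c => c = ' ' || c = '.') r with ⟨hbp, tbp⟩
    rcases hr : splitPR ('.' == ·) r with ⟨hdp, tdp⟩
    simp only [mySplit, splitPR, hr, hb] at ih ⊢
    by_cases hd : c = '.'
    · simp only [hd] at *
      simp only [show (('.' : Char) == '.') = true from rfl, if_true, List.flatMap_cons] at *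
      simpa [mySplit, splitPR] using ih
    · by_cases hs : c = ' '
      · simp only [hs] at *
        simp only [show (('.' : Char) == ' ') = false from rfl, Bool.false_eq_true, if_false,
          List.flatMap_cons] at *
        rcases hsp : splitPR (' ' == ·) hdp with ⟨h2p, t2p⟩
        simp only [hsp, splitPR, show ((' ' : Char) == ' ') = true from rfl, if_true] at ih ⊢
        simp only [List.cons_append] at ih ⊢
        simp [ih]
      · have h1 : ('.' == c) = false := by simp [Ne.symm hd]
        have h3 : (c = ' ' || c = '.') = false := by simp [hd, hs]
        simp only [h1, h3, Bool.false_eq_true, if_false, List.flatMap_cons] at ih ⊢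
        rcases hsp : splitPR (' ' == ·) hdp with ⟨h2p, t2p⟩
        have h2 : (' ' == c) = false := by simp [Ne.symm hs]
        simp only [hsp, splitPR] at ih ⊢
        simp only [h2, Bool.false_eq_true, if_false] at ⊢
        simp only [List.cons_append] at ih
        obtain ⟨e1, e2⟩ := List.cons.injEq .. ▸ ih
        simp [e1, e2]

-- the words list both programs tokenise to
def Wtoks (data : List String) : List String :=
  data.flatMap (fun row => (mySplit (fun c => c = ' ' || c = '.') row.toList).map String.ofList)

lemma A_words (data : List String) :
    (PySem.List.pyRange 0 (PySem.List.len data) 1).foldl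
      (fun words i =>
        let sents := pySplitStr (PySem.List.pyGetD data i "") "."
        (PySem.List.pyRange 0 (PySem.List.len sents) 1).foldl
          (fun words j => words ++ pySplitStr (PySem.List.pyGetD sents j "") " ")
          words)
      [] = Wtoks data := by
  have inner : ∀ (sents : List String) (ws : List String),
      (PySem.List.pyRange 0 (PySem.List.len sents) 1).foldl
        (fun words j => words ++ pySplitStr (PySem.List.pyGetD sents j "") " ") ws
      = ws ++ sents.flatMap (fun s => pySplitStr s " ") := by
    intro sents ws
    rw [PySem.List.len_eq, PySem.List.foldl_pyRange_zero_pyGetD' sents "" (fun ws s => ws ++ pySplitStr s " ") ws]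
    exact PySem.List.foldl_append_eq_flatMap _ _ _
  rw [PySem.List.len_eq,
      PySem.List.foldl_pyRange_zero_pyGetD' data ""
        (fun words row =>
          let sents := pySplitStr row "."
          (PySem.List.pyRange 0 (PySem.List.len sents) 1).foldl
            (fun words j => words ++ pySplitStr (PySem.List.pyGetD sents j "") " ") words) []]
  simp only [inner]
  rw [PySem.List.foldl_append_eq_flatMap (fun row => (pySplitStr row ".").flatMap (fun s => pySplitStr s " ")) data []]
  simp only [List.nil_append, Wtoks]
  congr 1; funext row
  simp only [pySplitStr, List.flatMap_map, String.toList_ofList]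
  rw [show (".").toList = ['.'] from rfl, show (" ").toList = [' '] from rfl,
    splitOn_single row.toList '.']
  simp only [splitOn_single]
  rw [← List.map_flatMap, split_compose]

lemma altRow_spec (cs cur : List Char) (t : Int) (v : PySem.Set String) :
    altRow cs cur t v =
      (t + ((splitPR (fun c => c = ' ' || c = '.') cs).2.length + 1 : Nat),
       (((cur ++ (splitPR (fun c => c = ' ' || c = '.') cs).1)
          :: (splitPR (fun c => c = ' ' || c = '.') cs).2).map String.ofList).foldl PySem.Set.add v) := by
  induction cs generalizing cur t v with
  | nil => simp [altRow, splitPR]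
  | cons c rest ih =>
    by_cases hc : (c = ' ' || c = '.') = true
    · rw [altRow, if_pos hc, ih]
      simp only [splitPR, hc, if_true, Prod.mk.injEq, List.nil_append, List.map_cons,
        List.foldl_cons, List.length_cons]
      refine ⟨by push_cast; ring, by simp⟩
    · rw [altRow, if_neg hc, ih]
      simp [splitPR, hc]

lemma B_fold (data : List String) (t : Int) (v : PySem.Set String) :
    data.foldl (fun acc row => altRow row.toList [] acc.1 acc.2) (t, v) =
      (t + ((Wtoks data).length : Nat), (Wtoks data).foldl PySem.Set.add v) := by
  induction data generalizing t v with
  | nil => simp [Wtoks]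
  | cons row rest ih =>
    rw [List.foldl_cons, altRow_spec, ih]
    simp only [Wtoks, List.flatMap_cons, List.length_append, List.foldl_append,
      List.nil_append, Prod.mk.injEq, mySplit, List.length_map, List.length_cons]
    refine ⟨by push_cast; ring, by simp⟩

-- ===== VERDICT (by name: the statement is the Claim_ definition above) =====
theorem WordsVocabCountDF_spec : Claim_equal_WordsVocabCountDF := by
  intro data _
  show WordsVocabCountDF data = WordsVocabCountDF_alt data
  simp only [WordsVocabCountDF, WordsVocabCountDF_alt]
  rw [A_words, B_fold]
  simp only [PySem.List.len_eq, PySem.Set.len, PySem.Set.ofList_eq_foldl, PySem.Set.empty,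
    Prod.mk.injEq]
  refine ⟨by ring, trivial⟩
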